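-- pv_equiv track=rewrite | github.com/diodiogod/taggui-video | taggui/widgets/image_list_masonry_incremental_service.py | _compute_end_heights
-- ===== SOURCE A (Python) =====
-- def _compute_end_heights(items, col_w, spacing, num_cols):
--     """Compute column heights after all items in a page."""
--     end_heights = [0] * num_cols
--     for item in items:
--         col = item['x'] // (col_w + spacing)
--         if 0 <= col < num_cols:
--             bottom = item['y'] + item['height'] + spacing
--             if bottom > end_heights[col]:
--                 end_heights[col] = bottom
--     return end_heights
-- ===== SOURCE B (Python) =====
-- def _compute_end_heights(items, col_w, spacing, num_cols):
--     """Compute column heights after all items in a page."""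
--     d = col_w + spacing
--     return [max([0] + [it['y'] + it['height'] + spacing
--                        for it in items if it['x'] // d == c])
--             for c in range(num_cols)]
-- ===== Notes on version B (the rewrite author's own statement) =====
-- stated objective: alternative
-- what changed: Column-major instead of item-major: for each column c, scan the items whose x falls in column c and take max([0]+bottoms), replacing A's single item pass with an in-place running-max array.
import Mathlib
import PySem

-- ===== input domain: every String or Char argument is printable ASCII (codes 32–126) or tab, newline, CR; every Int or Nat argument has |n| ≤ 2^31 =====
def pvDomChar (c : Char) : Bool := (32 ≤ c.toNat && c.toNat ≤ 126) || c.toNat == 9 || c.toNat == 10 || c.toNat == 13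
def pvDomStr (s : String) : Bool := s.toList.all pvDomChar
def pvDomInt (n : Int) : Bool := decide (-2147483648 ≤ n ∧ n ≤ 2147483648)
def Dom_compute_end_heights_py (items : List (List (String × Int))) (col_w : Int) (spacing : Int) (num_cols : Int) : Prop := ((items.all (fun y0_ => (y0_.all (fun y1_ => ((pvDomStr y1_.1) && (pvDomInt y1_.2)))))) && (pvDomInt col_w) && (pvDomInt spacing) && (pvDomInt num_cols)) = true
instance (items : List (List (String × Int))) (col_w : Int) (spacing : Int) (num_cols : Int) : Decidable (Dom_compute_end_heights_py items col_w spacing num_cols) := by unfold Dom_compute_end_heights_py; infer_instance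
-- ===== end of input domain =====

-- B is column-major: for each column c it scans the items landing in column c and takes
-- max([0]+bottoms), instead of A's single item pass updating a running-max array in place.

-- dict lookup item[k], defaulting to 0; the default is never used inside Pre_ (keys are present there)
def pvGet (item : List (String × Int)) (k : String) : Int :=
  ((PySem.Dict.mk item).get? k).getD 0

-- ===== PORT A =====
def compute_end_heights_py (items : List (List (String × Int))) (col_w : Int) (spacing : Int) (num_cols : Int) : List Int :=
  items.foldl (fun end_heights item =>
    let col := PySem.Int.floordiv (pvGet item "x") (col_w + spacing)
    if 0 ≤ col ∧ col < num_cols then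
      let bottom := pvGet item "y" + pvGet item "height" + spacing
      if bottom > end_heights.getD col.toNat 0 then
        end_heights.set col.toNat bottom
      else end_heights
    else end_heights) (List.replicate num_cols.toNat 0)

-- ===== PORT B =====
def compute_end_heights_py_alt (items : List (List (String × Int))) (col_w : Int) (spacing : Int) (num_cols : Int) : List Int :=
  let d := col_w + spacing
  (PySem.List.pyRange 0 num_cols 1).map (fun c =>
    (PySem.List.max? ((0 : Int) ::
        (items.filter (fun it => PySem.Int.floordiv (pvGet it "x") d == c)).map
          (fun it => pvGet it "y" + pvGet it "height" + spacing))
      (fun y => y)).getD 0)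

-- ===== PRECONDITION & SPEC =====
-- Pre_ excludes exactly the inputs where Python A raises: col_w+spacing = 0 with at least one item
-- (ZeroDivisionError), or a needed dict key missing (KeyError: 'x' always needed; 'y'/'height' only
-- when the column is in range).
def Pre_compute_end_heights_py (items : List (List (String × Int))) (col_w : Int) (spacing : Int) (num_cols : Int) : Prop :=
  (items = [] ∨ col_w + spacing ≠ 0) ∧ ∀ item ∈ items,
    ((PySem.Dict.mk item).get? "x").isSome = true ∧
    ((0 ≤ PySem.Int.floordiv (pvGet item "x") (col_w + spacing) ∧
      PySem.Int.floordiv (pvGet item "x") (col_w + spacing) < num_cols) →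
      ((PySem.Dict.mk item).get? "y").isSome = true ∧
      ((PySem.Dict.mk item).get? "height").isSome = true)
instance (items : List (List (String × Int))) (col_w : Int) (spacing : Int) (num_cols : Int) : Decidable (Pre_compute_end_heights_py items col_w spacing num_cols) := by unfold Pre_compute_end_heights_py; infer_instance

def pvWitness_compute_end_heights_py : (List (List (String × Int))) × Int × Int × Int :=
  ([[("x", 0), ("y", 5), ("height", 3)], [("x", 13), ("y", 1), ("height", 2)]], 10, 2, 2)

def Spec_compute_end_heights_py (items : List (List (String × Int))) (col_w : Int) (spacing : Int) (num_cols : Int) (out : List Int) : Prop := out = compute_end_heights_py_alt items col_w spacing num_cols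
instance (items : List (List (String × Int))) (col_w : Int) (spacing : Int) (num_cols : Int) (out : List Int) : Decidable (Spec_compute_end_heights_py items col_w spacing num_cols out) := by unfold Spec_compute_end_heights_py; infer_instance

-- ===== CLAIM (what is proved, stated in full; the proofs are below) =====
def Claim_equal_compute_end_heights_py : Prop := ∀ (items : List (List (String × Int))) (col_w : Int) (spacing : Int) (num_cols : Int), Dom_compute_end_heights_py items col_w spacing num_cols → Pre_compute_end_heights_py items col_w spacing num_cols → Spec_compute_end_heights_py items col_w spacing num_cols (compute_end_heights_py items col_w spacing num_cols)

-- ===== LEMMAS AND PROOFS =====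

-- A's loop step, named for the lemmas below
def stepA (col_w spacing num_cols : Int) (end_heights : List Int) (item : List (String × Int)) : List Int :=
  let col := PySem.Int.floordiv (pvGet item "x") (col_w + spacing)
  if 0 ≤ col ∧ col < num_cols then
    let bottom := pvGet item "y" + pvGet item "height" + spacing
    if bottom > end_heights.getD col.toNat 0 then
      end_heights.set col.toNat bottom
    else end_heights
  else end_heights

theorem stepA_length (col_w spacing num_cols : Int) (acc : List Int) (item : List (String × Int)) :
    (stepA col_w spacing num_cols acc item).length = acc.length := by
  unfold stepA; dsimp only; split <;> [skip; rfl]; split <;> simp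

theorem foldl_stepA_length (col_w spacing num_cols : Int) (items : List (List (String × Int))) (acc : List Int) :
    (items.foldl (stepA col_w spacing num_cols) acc).length = acc.length := by
  induction items generalizing acc with
  | nil => rfl
  | cons it rest ih => rw [List.foldl_cons, ih, stepA_length]

-- pointwise loop invariant: column c of A's state is the running max over the items of column c
theorem foldl_stepA_getD (col_w spacing num_cols : Int) (items : List (List (String × Int)))
    (acc : List Int) (hlen : acc.length = num_cols.toNat) (c : Nat) (hc : c < num_cols.toNat) :
    (items.foldl (stepA col_w spacing num_cols) acc).getD c 0 =
    ((items.filter (fun it => PySem.Int.floordiv (pvGet it "x") (col_w + spacing) == (c : Int))).map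
      (fun it => pvGet it "y" + pvGet it "height" + spacing)).foldl max (acc.getD c 0) := by
  induction items generalizing acc with
  | nil => rfl
  | cons it rest ih =>
    rw [List.foldl_cons, List.filter_cons]
    have hcN : (c : Int) < num_cols := by omega
    by_cases heq : PySem.Int.floordiv (pvGet it "x") (col_w + spacing) = (c : Int)
    · have hstep : stepA col_w spacing num_cols acc it =
          (if pvGet it "y" + pvGet it "height" + spacing > acc.getD c 0 then
            acc.set c (pvGet it "y" + pvGet it "height" + spacing) else acc) := by
        unfold stepA; dsimp only
        rw [heq, if_pos ⟨Int.natCast_nonneg c, hcN⟩]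
        simp only [Int.toNat_natCast]
      rw [hstep]
      simp only [heq, beq_self_eq_true, if_pos, List.map_cons, List.foldl_cons]
      split <;> rename_i hgt
      · rw [ih _ (by simp [hlen])]
        have hset : (acc.set c (pvGet it "y" + pvGet it "height" + spacing)).getD c 0
            = pvGet it "y" + pvGet it "height" + spacing := by
          simp [List.getD, List.getElem?_set_self (show c < acc.length by omega)]
        rw [hset]
        congr 1
        exact (max_eq_right (le_of_lt hgt)).symm
      · rw [ih _ hlen]
        congr 1
        exact (max_eq_left (not_lt.mp hgt)).symm
    · have hskip : (stepA col_w spacing num_cols acc it).getD c 0 = acc.getD c 0 ∧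
          (stepA col_w spacing num_cols acc it).length = acc.length := by
        refine ⟨?_, stepA_length _ _ _ _ _⟩
        unfold stepA; dsimp only
        split <;> rename_i hin
        · split
          · have hne : (PySem.Int.floordiv (pvGet it "x") (col_w + spacing)).toNat ≠ c := by
              omega
            simp [List.getD, List.getElem?_set_ne hne]
          · rfl
        · rfl
      have hfe : (if (PySem.Int.floordiv (pvGet it "x") (col_w + spacing) == (c : Int)) = true
          then it :: rest.filter (fun it => PySem.Int.floordiv (pvGet it "x") (col_w + spacing) == (c : Int))
          else rest.filter (fun it => PySem.Int.floordiv (pvGet it "x") (col_w + spacing) == (c : Int)))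
          = rest.filter (fun it => PySem.Int.floordiv (pvGet it "x") (col_w + spacing) == (c : Int)) := by
        simp [heq]
      rw [hfe, ih _ (by rw [hskip.2, hlen]), hskip.1]

theorem A_eq_foldl (items : List (List (String × Int))) (col_w spacing num_cols : Int) :
    compute_end_heights_py items col_w spacing num_cols
    = items.foldl (stepA col_w spacing num_cols) (List.replicate num_cols.toNat 0) := rfl

theorem compute_end_heights_py_eq (items : List (List (String × Int))) (col_w spacing num_cols : Int) :
    compute_end_heights_py items col_w spacing num_cols
    = compute_end_heights_py_alt items col_w spacing num_cols := by
  rw [A_eq_foldl]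
  unfold compute_end_heights_py_alt
  dsimp only
  apply List.ext_getElem
  · rw [foldl_stepA_length]
    simp [PySem.List.length_pyRange_one]
  · intro c h1 h2
    have hc : c < num_cols.toNat := by
      rw [foldl_stepA_length] at h1; simpa using h1
    have hA : (items.foldl (stepA col_w spacing num_cols) (List.replicate num_cols.toNat 0))[c]
        = (items.foldl (stepA col_w spacing num_cols) (List.replicate num_cols.toNat 0)).getD c 0 := by
      rw [List.getD, List.getElem?_eq_getElem h1]; rfl
    rw [hA, foldl_stepA_getD col_w spacing num_cols items _ (by simp) c hc]
    simp only [List.getElem_map, PySem.List.getElem_pyRange_one, zero_add]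
    have hmax : (PySem.List.max? ((0 : Int) ::
        (items.filter (fun it => PySem.Int.floordiv (pvGet it "x") (col_w + spacing) == ((c : Nat) : Int))).map
          (fun it => pvGet it "y" + pvGet it "height" + spacing)) (fun y => y)).getD 0
        = ((items.filter (fun it => PySem.Int.floordiv (pvGet it "x") (col_w + spacing) == ((c : Nat) : Int))).map
          (fun it => pvGet it "y" + pvGet it "height" + spacing)).foldl max 0 := by
      rw [PySem.List.max?_id_cons]; rfl
    rw [hmax]
    have h0 : (List.replicate num_cols.toNat (0 : Int)).getD c 0 = 0 := by
      simp [List.getD, hc]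
    rw [h0]

-- ===== VERDICT (by name: the statement is the Claim_ definition above) =====
theorem compute_end_heights_py_spec : Claim_equal_compute_end_heights_py := by
  intro items col_w spacing num_cols _ _
  exact compute_end_heights_py_eq items col_w spacing num_cols
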